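-- pv_equiv track=rewrite | github.com/rodrib/cryptopy | views/04_cryptografia_clasica.py | cifrado_columna
-- ===== SOURCE A (Python) =====
-- def cifrado_columna(texto):
--     num_columnas = 3
--     longitud_texto = len(texto)
--     num_filas = (longitud_texto + num_columnas - 1) // num_columnas
--     texto += ' ' * (num_filas * num_columnas - longitud_texto)
--     columnas_original = [texto[i::num_filas] for i in range(num_filas)]
--     columnas_cifradas = ['[' + col + ']' for col in columnas_original]
--     texto_cifrado = ''.join(columnas_cifradas)
--     return texto_cifrado
-- ===== SOURCE B (Python) =====
-- def cifrado_columna(texto):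
--     n = len(texto)
--     num_filas = (n + 2) // 3
--     texto = texto + ' ' * (num_filas * 3 - n)
--     buckets = [''] * num_filas
--     for idx, ch in enumerate(texto):
--         buckets[idx % num_filas] += ch
--     return ''.join('[' + b + ']' for b in buckets)
-- ===== Notes on version B (the rewrite author's own statement) =====
-- stated objective: alternative
-- what changed: Replaced A's per-column gather by stride slices texto[i::num_filas] with a single scatter pass over enumerate(texto) that appends each character to bucket idx % num_filas, then brackets and joins the buckets.
import Mathlib
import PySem

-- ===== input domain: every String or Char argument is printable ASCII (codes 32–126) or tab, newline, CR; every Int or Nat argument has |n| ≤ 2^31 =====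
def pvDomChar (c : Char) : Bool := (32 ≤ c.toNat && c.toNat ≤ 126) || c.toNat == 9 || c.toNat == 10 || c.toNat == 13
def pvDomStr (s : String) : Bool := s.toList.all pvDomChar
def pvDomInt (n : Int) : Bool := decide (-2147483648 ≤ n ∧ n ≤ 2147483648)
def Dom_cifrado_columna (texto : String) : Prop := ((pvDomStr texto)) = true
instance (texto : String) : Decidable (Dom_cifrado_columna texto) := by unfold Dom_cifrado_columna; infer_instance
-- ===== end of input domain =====

-- B replaces A's per-column gather by stride slices with one scatter pass over
-- enumerate(texto) into num_filas buckets (idx % num_filas); same output, same cost.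

-- ===== PORT A =====
def cifrado_columna (texto : String) : String :=
  let num_columnas : Int := 3
  let longitud_texto : Int := PySem.Str.len texto
  let num_filas : Int := PySem.Int.floordiv (longitud_texto + num_columnas - 1) num_columnas
  let padded : List Char :=
    texto.toList ++ PySem.List.pyRepeat [' '] (num_filas * num_columnas - longitud_texto)
  let columnas_original : List (List Char) :=
    (PySem.List.pyRange 0 num_filas 1).map
      (fun i => (PySem.List.slice? padded (some i) none num_filas).getD [])
  let columnas_cifradas : List (List Char) :=
    columnas_original.map (fun col => ['['] ++ col ++ [']'])
  String.ofList (PySem.Chars.join [] columnas_cifradas)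

-- ===== PORT B =====
def cifrado_columna_alt (texto : String) : String :=
  let n : Int := PySem.Str.len texto
  let num_filas : Int := PySem.Int.floordiv (n + 2) 3
  let padded : List Char := texto.toList ++ PySem.List.pyRepeat [' '] (num_filas * 3 - n)
  let buckets : List (List Char) :=
    (PySem.List.enumerate padded 0).foldl
      (fun bs p => bs.modify ((PySem.Int.mod p.1 num_filas).toNat) (· ++ [p.2]))
      (List.replicate num_filas.toNat [])
  String.ofList (PySem.Chars.join [] (buckets.map (fun b => ['['] ++ b ++ [']'])))

-- ===== PRECONDITION & SPEC =====
def Spec_cifrado_columna (texto : String) (out : String) : Prop := out = cifrado_columna_alt texto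
instance (texto : String) (out : String) : Decidable (Spec_cifrado_columna texto out) := by unfold Spec_cifrado_columna; infer_instance

-- ===== CLAIM (what is proved, stated in full; the proofs are below) =====
def Claim_equal_cifrado_columna : Prop := ∀ (texto : String), Dom_cifrado_columna texto → Spec_cifrado_columna texto (cifrado_columna texto)

-- ===== LEMMAS AND PROOFS =====

/-- Characters of `l` (whose positions are enumerated from `s`) landing in bucket `j` mod `m`. -/
def pvPick (m : Nat) : List Char → Int → Nat → List Char
  | [], _, _ => []
  | c :: l, s, j => (if (s % (m : Int)).toNat = j then [c] else []) ++ pvPick m l (s + 1) j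

theorem pvPick_append (m : Nat) (u v : List Char) (s : Int) (j : Nat) :
    pvPick m (u ++ v) s j = pvPick m u s j ++ pvPick m v (s + u.length) j := by
  induction u generalizing s with
  | nil => simp [pvPick]
  | cons c u ih => simp [pvPick, ih, List.append_assoc]; ring_nf

theorem pvPick_small (m : Nat) (hm : 0 < m) (u : List Char) (s : Int) (j : Nat)
    (hu : u.length ≤ m) (hj : j < m) :
    pvPick m u s j = (u[(((j : Int) - s) % (m : Int)).toNat]?).toList := by
  induction u generalizing s with
  | nil => simp [pvPick]
  | cons c u ih =>
    have hm' : (0 : Int) < (m : Int) := by exact_mod_cast hm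
    have hr0 : 0 ≤ s % (m : Int) := Int.emod_nonneg s (by omega)
    have hrm : s % (m : Int) < (m : Int) := Int.emod_lt_of_pos s hm'
    have hjm : ((j : Int)) % (m : Int) = (j : Int) :=
      Int.emod_eq_of_lt (by positivity) (by exact_mod_cast hj)
    have hu' : u.length ≤ m := by simp at hu; omega
    have e1 : ((j : Int) - s) % (m : Int)
        = (if s % (m : Int) ≤ (j : Int) then (j : Int) - s % (m : Int)
           else (j : Int) - s % (m : Int) + (m : Int)) := by
      rw [Int.sub_emod ((j : Int)) s, hjm]
      split_ifs with hge
      · exact Int.emod_eq_of_lt (show (0:Int) ≤ (j : Int) - s % (m : Int) by omega)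
          (show (j : Int) - s % (m : Int) < (m : Int) by omega)
      · conv_lhs => rw [show (j : Int) - s % (m : Int)
            = ((j : Int) - s % (m : Int) + (m : Int)) + (m : Int) * (-1) by ring]
        rw [Int.add_mul_emod_self_left]
        exact Int.emod_eq_of_lt (show (0:Int) ≤ (j : Int) - s % (m : Int) + (m : Int) by omega)
          (show (j : Int) - s % (m : Int) + (m : Int) < (m : Int) by omega)
    have e2 : ((j : Int) - (s + 1)) % (m : Int)
        = (((j : Int) - s) % (m : Int) + ((m : Int) - 1)) % (m : Int) := by
      rw [Int.emod_add_emod,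
        show ((j : Int) - s) + ((m : Int) - 1) = ((j : Int) - (s + 1)) + (m : Int) * 1 by ring,
        Int.add_mul_emod_self_left]
    by_cases hc : (s % (m : Int)).toNat = j
    · -- this character goes to bucket j
      have hd : ((j : Int) - s) % (m : Int) = 0 := by omega
      have hd' : ((j : Int) - (s + 1)) % (m : Int) = (m : Int) - 1 := by
        rw [e2, hd, zero_add]
        exact Int.emod_eq_of_lt (show (0:Int) ≤ (m : Int) - 1 by omega)
          (show (m : Int) - 1 < (m : Int) by omega)
      have hnone : u[((m : Int) - 1).toNat]? = (none : Option Char) :=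
        List.getElem?_eq_none (by simp at hu; omega)
      simp only [pvPick, if_pos hc, ih (s + 1) hu', hd', hd, hnone]
      simp
    · -- skipped: bucket index differs
      have hd1 : 1 ≤ ((j : Int) - s) % (m : Int) := by omega
      have hd' : ((j : Int) - (s + 1)) % (m : Int) = ((j : Int) - s) % (m : Int) - 1 := by
        rw [e2, show ((j : Int) - s) % (m : Int) + ((m : Int) - 1)
            = (((j : Int) - s) % (m : Int) - 1) + (m : Int) * 1 by ring,
          Int.add_mul_emod_self_left]
        exact Int.emod_eq_of_lt (show (0:Int) ≤ ((j : Int) - s) % (m : Int) - 1 by omega)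
          (show ((j : Int) - s) % (m : Int) - 1 < (m : Int) by omega)
      have hsucc : (((j : Int) - s) % (m : Int)).toNat
          = ((((j : Int) - (s + 1)) % (m : Int)).toNat) + 1 := by omega
      simp only [pvPick, if_neg hc, ih (s + 1) hu', hsucc]
      simp

theorem pvFold_eq (m : Nat) (l : List Char) : ∀ (s : Int) (bs : List (List Char)),
    (PySem.List.enumerate l s).foldl
      (fun bs p => bs.modify ((p.1 % (m : Int)).toNat) (· ++ [p.2])) bs
    = bs.mapIdx (fun j b => b ++ pvPick m l s j) := by
  induction l with
  | nil =>
    intro s bs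
    simp [PySem.List.enumerate_nil, pvPick]
    apply List.ext_getElem? ; intro i
    simp
  | cons c l ih =>
    intro s bs
    rw [PySem.List.enumerate_cons, List.foldl_cons, ih]
    apply List.ext_getElem? ; intro i
    simp only [List.getElem?_mapIdx, List.getElem?_modify]
    cases hbi : bs[i]? with
    | none => simp
    | some b =>
      simp only [Option.map_some, pvPick]
      by_cases ht : ((s % (m : Int)).toNat) = i <;>
        simp [ht, List.append_assoc]

theorem pvSlice (m : Nat) (hm : 0 < m) (P : List Char) (hP : P.length = 3 * m)
    (j : Nat) (hj : j < m) :
    PySem.List.slice? P (some (j : Int)) none (m : Int)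
      = some ((P[j]?).toList ++ (P[j + m]?).toList ++ (P[j + 2 * m]?).toList) := by
  have hm' : (0 : Int) < (m : Int) := by exact_mod_cast hm
  simp only [PySem.List.slice?, PySem.List.sliceIndices, hP]
  rw [if_neg (show ¬((m : Int) = 0) by omega)]
  simp only [if_neg (show ¬((m : Int) < 0) by omega),
    if_neg (show ¬((j : Int) < 0) by omega),
    if_pos (show (0 : Int) < (m : Int) by omega)]
  rw [min_eq_left (show (j : Int) ≤ ((3 * m : Nat) : Int) by push_cast; omega)]
  rw [if_pos (show (j : Int) < ((3 * m : Nat) : Int) by push_cast; omega)]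
  have hcount : (((((3 * m : Nat) : Int)) - j + m - 1) / (m : Int)).toNat = 3 := by
    rw [show ((((3 * m : Nat) : Int)) - j + m - 1) = ((m : Int) - 1 - j) + 3 * m by push_cast; ring,
      Int.add_mul_ediv_right _ _ (show (m : Int) ≠ 0 by omega),
      Int.ediv_eq_zero_of_lt (by omega) (by omega)]
    rfl
  rw [hcount, show List.range 3 = [0, 1, 2] from rfl]
  simp only [List.filterMap_cons, List.filterMap_nil]
  rw [show ((j : Int) + (m : Int) * ((0 : Nat) : Int)).toNat = j by omega,
    show ((j : Int) + (m : Int) * ((1 : Nat) : Int)).toNat = j + m by omega,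
    show ((j : Int) + (m : Int) * ((2 : Nat) : Int)).toNat = j + 2 * m by omega]
  rw [List.getElem?_eq_getElem (show j < P.length by omega),
    List.getElem?_eq_getElem (show j + m < P.length by omega),
    List.getElem?_eq_getElem (show j + 2 * m < P.length by omega)]
  rfl

theorem pvTriple (m : Nat) (hm : 0 < m) (P : List Char) (hP : P.length = 3 * m)
    (j : Nat) (hj : j < m) :
    pvPick m P 0 j = (P[j]?).toList ++ (P[j + m]?).toList ++ (P[j + 2 * m]?).toList := by
  have hm' : (0 : Int) < (m : Int) := by exact_mod_cast hm
  have l0 : (P.take m).length = m := by simp [hP]; omega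
  have l1 : ((P.drop m).take m).length = m := by simp [hP]; omega
  have l2 : ((P.drop m).drop m).length = m := by simp [hP]; omega
  conv_lhs => rw [show P = P.take m ++ ((P.drop m).take m ++ (P.drop m).drop m) by
    rw [List.take_append_drop, List.take_append_drop]]
  rw [pvPick_append, pvPick_append, l0, l1]
  rw [pvPick_small m hm _ _ j (le_of_eq l0) hj,
      pvPick_small m hm _ _ j (le_of_eq l1) hj,
      pvPick_small m hm _ _ j (le_of_eq l2) hj]
  have i0 : ((((j : Int)) - 0) % (m : Int)).toNat = j := by
    rw [sub_zero, Int.emod_eq_of_lt (by positivity) (by exact_mod_cast hj)]; omega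
  have i1 : (((j : Int) - ((0 : Int) + (m : Nat))) % (m : Int)).toNat = j := by
    rw [show (j : Int) - ((0 : Int) + (m : Nat)) = (j : Int) + (m : Int) * (-1) by ring,
      Int.add_mul_emod_self_left, Int.emod_eq_of_lt (by positivity) (by exact_mod_cast hj)]
    omega
  have i2 : (((j : Int) - (((0 : Int) + (m : Nat)) + (m : Nat))) % (m : Int)).toNat = j := by
    rw [show (j : Int) - (((0 : Int) + (m : Nat)) + (m : Nat)) = (j : Int) + (m : Int) * (-2) by ring,
      Int.add_mul_emod_self_left, Int.emod_eq_of_lt (by positivity) (by exact_mod_cast hj)]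
    omega
  rw [i0, i1, i2, List.append_assoc]
  congr 1
  · rw [List.getElem?_take_of_lt hj]
  congr 1
  · rw [List.getElem?_take_of_lt hj, List.getElem?_drop, Nat.add_comm]
  · rw [List.getElem?_drop, List.getElem?_drop, show m + (m + j) = j + 2 * m by omega]

theorem pvCore (m : Nat) (hm : 0 < m) (P : List Char) (hP : P.length = 3 * m) :
    (PySem.List.pyRange 0 (m : Int) 1).map
      (fun i => (PySem.List.slice? P (some i) none (m : Int)).getD [])
    = (PySem.List.enumerate P 0).foldl
        (fun bs p => bs.modify ((PySem.Int.mod p.1 (m : Int)).toNat) (· ++ [p.2]))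
        (List.replicate m []) := by
  have hmod : (fun (bs : List (List Char)) (p : Int × Char) =>
        bs.modify ((PySem.Int.mod p.1 (m : Int)).toNat) (· ++ [p.2]))
      = fun bs p => bs.modify ((p.1 % (m : Int)).toNat) (· ++ [p.2]) := by
    funext bs p
    rw [PySem.Int.mod_eq_emod_of_pos (by exact_mod_cast hm)]
  rw [hmod, pvFold_eq]
  apply List.ext_getElem
  · simp [PySem.List.length_pyRange_one]
  intro k h1 h2
  have hk : k < m := by
    rw [List.length_map, PySem.List.length_pyRange_one] at h1; omega
  rw [List.getElem_map, PySem.List.getElem_pyRange_one, List.getElem_mapIdx,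
    List.getElem_replicate]
  simp only [zero_add]
  rw [pvSlice m hm P hP k hk, Option.getD_some, pvTriple m hm P hP k hk]
  simp

-- ===== VERDICT (by name: the statement is the Claim_ definition above) =====
theorem cifrado_columna_spec : Claim_equal_cifrado_columna := by
  intro texto _
  unfold Spec_cifrado_columna cifrado_columna cifrado_columna_alt
  simp only [PySem.Str.len_eq]
  set n := texto.toList.length with hn
  have hf1 : PySem.Int.floordiv ((n : Int) + 3 - 1) 3 = (((n + 2) / 3 : Nat) : Int) := by
    rw [show ((n : Int) + 3 - 1) = (((n + 2 : Nat)) : Int) by push_cast; ring]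
    exact_mod_cast PySem.Int.floordiv_natCast (n + 2) 3
  have hf2 : PySem.Int.floordiv ((n : Int) + 2) 3 = (((n + 2) / 3 : Nat) : Int) := by
    rw [show ((n : Int) + 2) = (((n + 2 : Nat)) : Int) by push_cast; ring]
    exact_mod_cast PySem.Int.floordiv_natCast (n + 2) 3
  rw [hf1, hf2]
  set m := (n + 2) / 3 with hmdef
  by_cases h0 : n = 0
  · have hcs : texto.toList = [] := List.eq_nil_of_length_eq_zero (by omega)
    have hm0 : m = 0 := by omega
    rw [hcs, hm0, h0]
    decide
  · have hm : 0 < m := by omega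
    rw [PySem.List.pyRepeat_singleton]
    simp only [Int.toNat_natCast]
    have hP : (texto.toList ++ List.replicate (((m : Int) * 3 - (n : Int)).toNat) ' ').length
        = 3 * m := by
      simp only [List.length_append, List.length_replicate, ← hn]
      omega
    rw [pvCore m hm _ hP]
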